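-- pv_equiv track=rewrite | github.com/Pinguladora/advent-of-code | 2016/2/Python/main.py | get_bathroom_code_crossgrid
-- ===== SOURCE A (Python) =====
-- CROSS_KEYPAD = {
--             '1': {'D': '3'},
--             '2': {'R': '3', 'D': '6'},
--             '3': {'U': '1', 'D': '7', 'L': '2', 'R': '4'},
--             '4': {'L': '3', 'D': '8'},
--             '5': {'R': '6'},
--             '6': {'U': '2', 'D': 'A', 'L': '5', 'R': '7'},
--             '7': {'U': '3', 'D': 'B', 'L': '6', 'R': '8'},
--             '8': {'U': '4', 'D': 'C', 'L': '7', 'R': '9'},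
--             '9': {'L': '8'},
--             'A': {'U': '6', 'R': 'B'},
--             'B': {'U': '7', 'D': 'D', 'L': 'A', 'R': 'C'},
--             'C': {'U': '8', 'L': 'B'},
--             'D': {'U': 'B'}
--         }
--
-- def get_bathroom_code_crossgrid(start: str, instructions: str) -> str:
--     position = start
--     code = []
--     for instruction in instructions:
--         for move in instruction:
--             # Update position if move is possible
--             if move in CROSS_KEYPAD[position]:
--                 position = CROSS_KEYPAD[position][move]
--         code.append(position)
--     return "".join(code)
-- ===== SOURCE B (Python) =====
-- # Geometric re-implementation: keys placed on a diamond (center '7' at (0,0));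
-- # a move is a unit step kept only if it stays within Manhattan distance 2.
-- KEY_TO_COORD = {
--     '1': (0, 2),
--     '2': (-1, 1), '3': (0, 1), '4': (1, 1),
--     '5': (-2, 0), '6': (-1, 0), '7': (0, 0), '8': (1, 0), '9': (2, 0),
--     'A': (-1, -1), 'B': (0, -1), 'C': (1, -1),
--     'D': (0, -2),
-- }
-- COORD_TO_KEY = {v: k for k, v in KEY_TO_COORD.items()}
-- DELTAS = {'U': (0, 1), 'D': (0, -1), 'L': (-1, 0), 'R': (1, 0)}
--
-- def get_bathroom_code_crossgrid(start: str, instructions: str) -> str: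
--     position = start
--     code = []
--     for line in instructions:
--         for ch in line:
--             x, y = KEY_TO_COORD[position]
--             dx, dy = DELTAS.get(ch, (0, 0))
--             nx, ny = x + dx, y + dy
--             if abs(nx) + abs(ny) <= 2:
--                 position = COORD_TO_KEY[(nx, ny)]
--         code.append(position)
--     return "".join(code)
-- ===== Notes on version B (the rewrite author's own statement) =====
-- stated objective: idiomatic
-- what changed: Replaces the hand-written 13-key adjacency table (key -> move -> key) by a geometric model: each key gets a coordinate on the diamond, a move is a unit step accepted only if it stays within Manhattan distance 2 of the center, and the key is read back from a coordinate->key map.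
import Mathlib
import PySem

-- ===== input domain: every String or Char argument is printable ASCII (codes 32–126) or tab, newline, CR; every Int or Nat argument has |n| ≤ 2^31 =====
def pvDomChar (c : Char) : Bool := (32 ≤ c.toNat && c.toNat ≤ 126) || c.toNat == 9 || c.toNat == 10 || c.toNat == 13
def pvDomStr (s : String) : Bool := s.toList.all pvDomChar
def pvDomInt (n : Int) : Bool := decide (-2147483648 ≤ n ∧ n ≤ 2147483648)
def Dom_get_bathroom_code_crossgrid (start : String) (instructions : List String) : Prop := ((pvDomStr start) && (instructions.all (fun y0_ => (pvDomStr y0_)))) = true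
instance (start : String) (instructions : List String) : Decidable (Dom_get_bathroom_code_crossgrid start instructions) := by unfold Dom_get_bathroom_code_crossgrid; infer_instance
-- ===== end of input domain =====

-- B replaces A's hand-written adjacency table by a geometric diamond model
-- (coordinates + Manhattan-distance validity); same cost, more idiomatic.

-- ===== PORT A =====
def crossKeypad : PySem.Dict String (PySem.Dict Char String) :=
  PySem.Dict.mk [
    ("1", PySem.Dict.mk [('D', "3")]),
    ("2", PySem.Dict.mk [('R', "3"), ('D', "6")]),
    ("3", PySem.Dict.mk [('U', "1"), ('D', "7"), ('L', "2"), ('R', "4")]),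
    ("4", PySem.Dict.mk [('L', "3"), ('D', "8")]),
    ("5", PySem.Dict.mk [('R', "6")]),
    ("6", PySem.Dict.mk [('U', "2"), ('D', "A"), ('L', "5"), ('R', "7")]),
    ("7", PySem.Dict.mk [('U', "3"), ('D', "B"), ('L', "6"), ('R', "8")]),
    ("8", PySem.Dict.mk [('U', "4"), ('D', "C"), ('L', "7"), ('R', "9")]),
    ("9", PySem.Dict.mk [('L', "8")]),
    ("A", PySem.Dict.mk [('U', "6"), ('R', "B")]),
    ("B", PySem.Dict.mk [('U', "7"), ('D', "D"), ('L', "A"), ('R', "C")]),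
    ("C", PySem.Dict.mk [('U', "8"), ('L', "B")]),
    ("D", PySem.Dict.mk [('U', "B")])]

-- one char of the inner loop of A: `if move in CROSS_KEYPAD[position]: position = ...[move]`
-- (CROSS_KEYPAD[position] raises KeyError on a key not in the table; such inputs are outside Pre_)
def crossStepA (pos : String) (move : Char) : String :=
  match crossKeypad.get? pos with
  | none => pos
  | some row => if row.contains move then (row.get? move).getD pos else pos

def get_bathroom_code_crossgrid (start : String) (instructions : List String) : String :=
  let st := instructions.foldl
    (fun (st : String × List String) instruction =>
      let position := instruction.toList.foldl crossStepA st.1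
      (position, st.2 ++ [position]))
    (start, [])
  PySem.Str.join "" st.2

-- ===== PORT B =====
def keyToCoord : PySem.Dict String (Int × Int) :=
  PySem.Dict.mk [
    ("1", (0, 2)),
    ("2", (-1, 1)), ("3", (0, 1)), ("4", (1, 1)),
    ("5", (-2, 0)), ("6", (-1, 0)), ("7", (0, 0)), ("8", (1, 0)), ("9", (2, 0)),
    ("A", (-1, -1)), ("B", (0, -1)), ("C", (1, -1)),
    ("D", (0, -2))]

def coordToKey : PySem.Dict (Int × Int) String :=
  PySem.Dict.mk (keyToCoord.items.map (fun p => (p.2, p.1)))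

def crossDeltas : PySem.Dict Char (Int × Int) :=
  PySem.Dict.mk [('U', (0, 1)), ('D', (0, -1)), ('L', (-1, 0)), ('R', (1, 0))]

-- one char of B's inner loop (KEY_TO_COORD[position] raises KeyError outside Pre_)
def crossStepB (pos : String) (ch : Char) : String :=
  match keyToCoord.get? pos with
  | none => pos
  | some xy =>
    let d := crossDeltas.getD ch (0, 0)
    let n := (xy.1 + d.1, xy.2 + d.2)
    if |n.1| + |n.2| ≤ 2 then (coordToKey.get? n).getD pos else pos

def get_bathroom_code_crossgrid_alt (start : String) (instructions : List String) : String :=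
  let st := instructions.foldl
    (fun (st : String × List String) line =>
      let position := line.toList.foldl crossStepB st.1
      (position, st.2 ++ [position]))
    (start, [])
  PySem.Str.join "" st.2

-- ===== PRECONDITION & SPEC =====
-- Pre_ excludes exactly the inputs where Python raises KeyError: a start that is
-- not one of the 13 keypad keys together with at least one nonempty instruction line.
def Pre_get_bathroom_code_crossgrid (start : String) (instructions : List String) : Prop :=
  start ∈ ["1", "2", "3", "4", "5", "6", "7", "8", "9", "A", "B", "C", "D"] ∨
  ∀ line ∈ instructions, line = ""
instance (start : String) (instructions : List String) : Decidable (Pre_get_bathroom_code_crossgrid start instructions) := by unfold Pre_get_bathroom_code_crossgrid; infer_instance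

def pvWitness_get_bathroom_code_crossgrid : String × List String := ("7", ["ULL", "RRDDD", "LURDL", "UUUUD"])

def Spec_get_bathroom_code_crossgrid (start : String) (instructions : List String) (out : String) : Prop := out = get_bathroom_code_crossgrid_alt start instructions
instance (start : String) (instructions : List String) (out : String) : Decidable (Spec_get_bathroom_code_crossgrid start instructions out) := by unfold Spec_get_bathroom_code_crossgrid; infer_instance

-- ===== CLAIM (what is proved, stated in full; the proofs are below) =====
def Claim_equal_get_bathroom_code_crossgrid : Prop := ∀ (start : String) (instructions : List String), Dom_get_bathroom_code_crossgrid start instructions → Pre_get_bathroom_code_crossgrid start instructions → Spec_get_bathroom_code_crossgrid start instructions (get_bathroom_code_crossgrid start instructions)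

-- ===== LEMMAS AND PROOFS =====
-- the two single-character steps agree on EVERY position (both leave an unknown key unchanged)
lemma crossStep_eq (pos : String) (c : Char) : crossStepA pos c = crossStepB pos c := by
  by_cases hp : pos ∈ (["1","2","3","4","5","6","7","8","9","A","B","C","D"] : List String)
  · fin_cases hp <;>
    · by_cases hU : c = 'U'
      · subst hU; decide
      by_cases hD : c = 'D'
      · subst hD; decide
      by_cases hL : c = 'L'
      · subst hL; decide
      by_cases hR : c = 'R'
      · subst hR; decide
      have eU : ('U' == c) = false := by simp [Ne.symm hU]
      have eD : ('D' == c) = false := by simp [Ne.symm hD]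
      have eL : ('L' == c) = false := by simp [Ne.symm hL]
      have eR : ('R' == c) = false := by simp [Ne.symm hR]
      simp [crossStepA, crossStepB, crossKeypad, keyToCoord, coordToKey, crossDeltas,
            PySem.Dict.get?, PySem.Dict.getD, PySem.Dict.contains,
            List.find?, eU, eD, eL, eR]
      all_goals decide
  · simp only [List.mem_cons, List.not_mem_nil, or_false] at hp
    push Not at hp
    obtain ⟨h1, h2, h3, h4, h5, h6, h7, h8, h9, hA, hB, hC, hD⟩ := hp
    have e1 : ("1" == pos) = false := by simp [Ne.symm h1]
    have e2 : ("2" == pos) = false := by simp [Ne.symm h2]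
    have e3 : ("3" == pos) = false := by simp [Ne.symm h3]
    have e4 : ("4" == pos) = false := by simp [Ne.symm h4]
    have e5 : ("5" == pos) = false := by simp [Ne.symm h5]
    have e6 : ("6" == pos) = false := by simp [Ne.symm h6]
    have e7 : ("7" == pos) = false := by simp [Ne.symm h7]
    have e8 : ("8" == pos) = false := by simp [Ne.symm h8]
    have e9 : ("9" == pos) = false := by simp [Ne.symm h9]
    have eA : ("A" == pos) = false := by simp [Ne.symm hA]
    have eB : ("B" == pos) = false := by simp [Ne.symm hB]
    have eC : ("C" == pos) = false := by simp [Ne.symm hC]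
    have eE : ("D" == pos) = false := by simp [Ne.symm hD]
    simp [crossStepA, crossStepB, crossKeypad, keyToCoord,
          PySem.Dict.get?, List.find?, e1, e2, e3, e4, e5, e6, e7, e8, e9, eA, eB, eC, eE]

-- ===== VERDICT (by name: the statement is the Claim_ definition above) =====
theorem get_bathroom_code_crossgrid_spec : Claim_equal_get_bathroom_code_crossgrid := by
  intro start instructions _ _
  unfold Spec_get_bathroom_code_crossgrid get_bathroom_code_crossgrid get_bathroom_code_crossgrid_alt
  have h : crossStepA = crossStepB := funext fun p => funext fun c => crossStep_eq p c
  rw [h]
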